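-- pv_equiv track=rewrite | github.com/DraganMatesic/data_collector | data_collector/processing/training.py | _edit_distance_words
-- ===== SOURCE A (Python) =====
-- def _edit_distance_words(source_words: list[str], target_words: list[str]) -> int:
--     """Compute Levenshtein edit distance between two word sequences.
--
--     Same algorithm as character-level edit distance but operates on lists of words
--     instead of individual characters.
--
--     Args:
--         source_words: Source word sequence.
--         target_words: Target word sequence.
--
--     Returns:
--         Minimum number of word-level insertions, deletions, and substitutions
--         required to transform source_words into target_words.
--     """
--     source_length = len(source_words)
--     target_length = len(target_words)
--
--     if source_length == 0:
--         return target_length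
--     if target_length == 0:
--         return source_length
--
--     if source_length > target_length:
--         source_words, target_words = target_words, source_words
--         source_length, target_length = target_length, source_length
--
--     previous_row: list[int] = list(range(source_length + 1))
--     current_row: list[int] = [0] * (source_length + 1)
--
--     for target_index in range(1, target_length + 1):
--         current_row[0] = target_index
--         for source_index in range(1, source_length + 1):
--             deletion_cost = previous_row[source_index] + 1
--             insertion_cost = current_row[source_index - 1] + 1
--             substitution_cost = previous_row[source_index - 1]
--             if source_words[source_index - 1] != target_words[target_index - 1]:
--                 substitution_cost += 1
--             current_row[source_index] = min(deletion_cost, insertion_cost, substitution_cost)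
--         previous_row, current_row = current_row, previous_row
--
--     return previous_row[source_length]
-- ===== SOURCE B (Python) =====
-- def _edit_distance_words(source_words: list[str], target_words: list[str]) -> int:
--     """Word-level Levenshtein distance via top-down memoized recursion.
--
--     dist(i, j) is the edit distance between source_words[:i] and
--     target_words[:j], memoized in a dict keyed by (i, j).
--     """
--     memo: dict[tuple[int, int], int] = {}
--
--     def dist(i: int, j: int) -> int:
--         if i == 0:
--             return j
--         if j == 0:
--             return i
--         v = memo.get((i, j))
--         if v is None:
--             cost = 0 if source_words[i - 1] == target_words[j - 1] else 1
--             v = min(dist(i - 1, j) + 1, dist(i, j - 1) + 1, dist(i - 1, j - 1) + cost)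
--             memo[(i, j)] = v
--         return v
--
--     return dist(len(source_words), len(target_words))
-- ===== Notes on version B (the rewrite author's own statement) =====
-- stated objective: alternative
-- what changed: Replaces A's bottom-up two-row array DP (length swap, preallocated rows mutated in place and swapped each pass) with top-down memoized recursion dist(i, j) over prefix lengths, keyed by (i, j) in a dict; no swap, no row buffers.
import Mathlib
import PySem

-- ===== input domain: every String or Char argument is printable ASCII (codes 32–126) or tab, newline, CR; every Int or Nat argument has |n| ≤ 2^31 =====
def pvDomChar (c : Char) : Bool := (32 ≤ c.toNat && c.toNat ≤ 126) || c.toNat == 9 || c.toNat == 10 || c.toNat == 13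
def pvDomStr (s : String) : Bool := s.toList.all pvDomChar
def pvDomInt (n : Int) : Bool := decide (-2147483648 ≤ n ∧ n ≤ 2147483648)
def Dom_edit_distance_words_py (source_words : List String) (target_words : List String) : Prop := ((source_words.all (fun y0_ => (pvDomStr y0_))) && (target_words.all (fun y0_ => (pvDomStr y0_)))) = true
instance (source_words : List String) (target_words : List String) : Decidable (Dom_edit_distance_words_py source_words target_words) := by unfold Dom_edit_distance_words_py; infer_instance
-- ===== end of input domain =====

-- B replaces A's bottom-up two-row array DP (length swap, in-place rows) by top-down
-- memoized recursion on prefix lengths; same results, a different decomposition (not faster).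

-- ===== PORT A =====
-- the row loop of A, after the possible swap (src is 'source_words', tgt 'target_words' at that point);
-- all list indices read by the Python are in range, so getD is exact here
def pvRunA (src : List String) (tgt : List String) : Int :=
  let S := src.length
  let T := tgt.length
  let previous_row : List Int := (List.range (S + 1)).map (fun (i : Nat) => (i : Int))
  let current_row : List Int := List.replicate (S + 1) (0 : Int)
  let rows := (List.range' 1 T).foldl (fun (rows : List Int × List Int) (ti : Nat) =>
    let cur0 := rows.2.set 0 (ti : Int)
    let cur := (List.range' 1 S).foldl (fun (cur : List Int) (si : Nat) =>
      let deletion := rows.1.getD si 0 + 1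
      let insertion := cur.getD (si - 1) 0 + 1
      let substitution0 := rows.1.getD (si - 1) 0
      let substitution := if src.getD (si - 1) "" ≠ tgt.getD (ti - 1) "" then substitution0 + 1 else substitution0
      cur.set si (min (min deletion insertion) substitution)) cur0
    (cur, rows.1)) (previous_row, current_row)
  rows.1.getD S 0

def edit_distance_words_py (source_words : List String) (target_words : List String) : Int :=
  let source_length := source_words.length
  let target_length := target_words.length
  if source_length = 0 then (target_length : Int)
  else if target_length = 0 then (source_length : Int)
  else if source_length > target_length then pvRunA target_words source_words
  else pvRunA source_words target_words

-- ===== PORT B =====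
-- dist(i, j) of Source B, with the memo dict threaded through the recursion
def pvAltGo (source_words : List String) (target_words : List String) :
    Nat → Nat → PySem.Dict (Nat × Nat) Int → Int × PySem.Dict (Nat × Nat) Int
  | 0, j, memo => ((j : Int), memo)
  | i + 1, 0, memo => ((i + 1 : Int), memo)
  | i + 1, j + 1, memo =>
    match memo.get? (i + 1, j + 1) with
    | some v => (v, memo)
    | none =>
      let cost : Int := if source_words.getD i "" = target_words.getD j "" then 0 else 1
      let r1 := pvAltGo source_words target_words i (j + 1) memo
      let r2 := pvAltGo source_words target_words (i + 1) j r1.2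
      let r3 := pvAltGo source_words target_words i j r2.2
      let v := min (min (r1.1 + 1) (r2.1 + 1)) (r3.1 + cost)
      (v, r3.2.insert (i + 1, j + 1) v)
termination_by i j _ => i + j

def edit_distance_words_py_alt (source_words : List String) (target_words : List String) : Int :=
  (pvAltGo source_words target_words source_words.length target_words.length PySem.Dict.empty).1

-- ===== PRECONDITION & SPEC =====
def Spec_edit_distance_words_py (source_words : List String) (target_words : List String) (out : Int) : Prop := out = edit_distance_words_py_alt source_words target_words
instance (source_words : List String) (target_words : List String) (out : Int) : Decidable (Spec_edit_distance_words_py source_words target_words out) := by unfold Spec_edit_distance_words_py; infer_instance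

-- ===== CLAIM (what is proved, stated in full; the proofs are below) =====
def Claim_equal_edit_distance_words_py : Prop := ∀ (source_words : List String) (target_words : List String), Dom_edit_distance_words_py source_words target_words → Spec_edit_distance_words_py source_words target_words (edit_distance_words_py source_words target_words)

-- ===== LEMMAS AND PROOFS =====

-- the word-level Levenshtein distance on prefix lengths (proof-side reference function)
def pvLev (s : List String) (t : List String) : Nat → Nat → Int
  | 0, j => (j : Int)
  | i + 1, 0 => (i + 1 : Int)
  | i + 1, j + 1 =>
    min (min (pvLev s t i (j + 1) + 1) (pvLev s t (i + 1) j + 1))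
        (pvLev s t i j + if s.getD i "" = t.getD j "" then 0 else 1)
termination_by i j => i + j

theorem pvLev_zero_right (s t : List String) (i : Nat) : pvLev s t i 0 = (i : Int) := by
  cases i <;> simp [pvLev]

theorem pvLev_symm (s t : List String) : ∀ n i j, i + j ≤ n → pvLev s t i j = pvLev t s j i := by
  intro n
  induction n with
  | zero => intro i j h
            have hi : i = 0 := by omega
            have hj : j = 0 := by omega
            subst hi; subst hj; simp [pvLev]
  | succ n ih =>
    intro i j h
    match i, j with
    | 0, j => simp [pvLev, pvLev_zero_right]
    | i + 1, 0 => simp [pvLev, pvLev_zero_right]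
    | i + 1, j + 1 =>
      have h1 := ih i (j + 1) (by omega)
      have h2 := ih (i + 1) j (by omega)
      have h3 := ih i j (by omega)
      simp only [pvLev]
      rw [h1, h2, h3, min_comm (pvLev t s (j + 1) i + 1)]
      congr 2
      by_cases he : s.getD i "" = t.getD j ""
      · rw [if_pos he, if_pos he.symm]
      · rw [if_neg he, if_neg (fun hh => he hh.symm)]

def pvInv (s t : List String) (memo : PySem.Dict (Nat × Nat) Int) : Prop :=
  ∀ p v, memo.get? p = some v → v = pvLev s t p.1 p.2

theorem pvAltGo_correct (s t : List String) : ∀ n i j memo, i + j ≤ n → pvInv s t memo →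
    (pvAltGo s t i j memo).1 = pvLev s t i j ∧ pvInv s t (pvAltGo s t i j memo).2 := by
  intro n
  induction n with
  | zero =>
    intro i j memo h hinv
    have hi : i = 0 := by omega
    have hj : j = 0 := by omega
    subst hi; subst hj
    exact ⟨by simp [pvAltGo, pvLev], by simpa [pvAltGo] using hinv⟩
  | succ n ih =>
    intro i j memo h hinv
    match i, j with
    | 0, j => exact ⟨by simp [pvAltGo, pvLev], by simpa [pvAltGo] using hinv⟩
    | i + 1, 0 => exact ⟨by simp [pvAltGo, pvLev], by simpa [pvAltGo] using hinv⟩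
    | i + 1, j + 1 =>
      rw [pvAltGo]
      cases hm : memo.get? (i + 1, j + 1) with
      | some v =>
        exact ⟨hinv (i + 1, j + 1) v hm, hinv⟩
      | none =>
        simp only
        obtain ⟨e1, hinv1⟩ := ih i (j + 1) memo (by omega) hinv
        obtain ⟨e2, hinv2⟩ := ih (i + 1) j _ (by omega) hinv1
        obtain ⟨e3, hinv3⟩ := ih i j _ (by omega) hinv2
        constructor
        · simp only [e1, e2, e3, pvLev]
        · intro p w hw
          rw [PySem.Dict.get?_insert] at hw
          by_cases hp : p = (i + 1, j + 1)
          · rw [if_pos hp] at hw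
            cases hw
            subst hp
            simp only [e1, e2, e3, pvLev]
          · rw [if_neg hp] at hw
            exact hinv3 p w hw

theorem pv_alt_eq_lev (s t : List String) :
    edit_distance_words_py_alt s t = pvLev s t s.length t.length := by
  have h := pvAltGo_correct s t (s.length + t.length) s.length t.length PySem.Dict.empty
    le_rfl (by intro p v hv; simp [PySem.Dict.get?_empty] at hv)
  simpa [edit_distance_words_py_alt] using h.1

def pvStepIn (src tgt : List String) (prev : List Int) (ti : Nat) (cur : List Int) (si : Nat) : List Int :=
  cur.set si (min (min (prev.getD si 0 + 1) (cur.getD (si - 1) 0 + 1))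
    (if src.getD (si - 1) "" ≠ tgt.getD (ti - 1) "" then prev.getD (si - 1) 0 + 1 else prev.getD (si - 1) 0))

def pvStepOut (src tgt : List String) (S : Nat) (rows : List Int × List Int) (ti : Nat) : List Int × List Int :=
  ((List.range' 1 S).foldl (pvStepIn src tgt rows.1 ti) (rows.2.set 0 (ti : Int)), rows.1)

theorem pv_inner (src tgt : List String) (S : Nat) (k : Nat) (prev : List Int)
    (hprev : ∀ i, i ≤ S → prev.getD i 0 = pvLev src tgt i k) :
    ∀ q p (cur : List Int), cur.length = S + 1 → p + q ≤ S →
    (∀ i, i ≤ p → cur.getD i 0 = pvLev src tgt i (k + 1)) →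
    ((List.range' (p + 1) q).foldl (pvStepIn src tgt prev (k + 1)) cur).length = S + 1 ∧
    (∀ i, i ≤ p + q → ((List.range' (p + 1) q).foldl (pvStepIn src tgt prev (k + 1)) cur).getD i 0 = pvLev src tgt i (k + 1)) := by
  intro q
  induction q with
  | zero => intro p cur hlen _ hcur; simpa using ⟨hlen, hcur⟩
  | succ q ihq =>
    intro p cur hlen hpq hcur
    rw [List.range'_succ, List.foldl_cons]
    have hlt : p + 1 < cur.length := by omega
    -- the freshly written cell
    have hset : (pvStepIn src tgt prev (k + 1) cur (p + 1)).getD (p + 1) 0 = pvLev src tgt (p + 1) (k + 1) := by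
      rw [pvStepIn, List.getD_eq_getElem?_getD, List.getElem?_set_self hlt]
      simp only [Nat.add_sub_cancel, Option.getD_some]
      rw [hprev (p + 1) (by omega), hprev p (by omega), hcur p le_rfl]
      rw [pvLev]
      rw [min_comm (pvLev src tgt p (k + 1) + 1)]
      congr 1
      by_cases he : src.getD p "" = tgt.getD k ""
      · rw [if_neg (by simpa using he), if_pos he]; ring
      · rw [if_pos he, if_neg he]
    have hkeep : ∀ i, i ≤ p → (pvStepIn src tgt prev (k + 1) cur (p + 1)).getD i 0 = pvLev src tgt i (k + 1) := by
      intro i hi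
      rw [pvStepIn, List.getD_eq_getElem?_getD, List.getElem?_set_ne (by omega), ← List.getD_eq_getElem?_getD]
      exact hcur i hi
    have := ihq (p + 1) (pvStepIn src tgt prev (k + 1) cur (p + 1))
      (by rw [pvStepIn, List.length_set]; exact hlen) (by omega)
      (by intro i hi
          rcases Nat.lt_or_ge i (p + 1) with h | h
          · exact hkeep i (by omega)
          · have : i = p + 1 := by omega
            subst this; exact hset)
    refine ⟨this.1, ?_⟩
    intro i hi
    exact this.2 i (by omega)

theorem pv_outer (src tgt : List String) (S : Nat) :
    ∀ q k (prev cur : List Int), prev.length = S + 1 → cur.length = S + 1 →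
    (∀ i, i ≤ S → prev.getD i 0 = pvLev src tgt i k) →
    (((List.range' (k + 1) q).foldl (pvStepOut src tgt S) (prev, cur)).1.length = S + 1 ∧
     ((List.range' (k + 1) q).foldl (pvStepOut src tgt S) (prev, cur)).2.length = S + 1 ∧
     ∀ i, i ≤ S → ((List.range' (k + 1) q).foldl (pvStepOut src tgt S) (prev, cur)).1.getD i 0 = pvLev src tgt i (k + q)) := by
  intro q
  induction q with
  | zero => intro k prev cur h1 h2 h3; simpa using ⟨h1, h2, h3⟩
  | succ q ihq =>
    intro k prev cur h1 h2 h3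
    rw [List.range'_succ, List.foldl_cons]
    have hcur0len : (cur.set 0 ((k + 1 : Nat) : Int)).length = S + 1 := by rw [List.length_set]; exact h2
    have hinner := pv_inner src tgt S k prev h3 S 0 (cur.set 0 ((k + 1 : Nat) : Int)) hcur0len (by omega)
      (by intro i hi
          have : i = 0 := by omega
          subst this
          rw [List.getD_eq_getElem?_getD, List.getElem?_set_self (by omega)]
          simp [pvLev])
    have hstep : pvStepOut src tgt S (prev, cur) (k + 1) =
        ((List.range' 1 S).foldl (pvStepIn src tgt prev (k + 1)) (cur.set 0 ((k + 1 : Nat) : Int)), prev) := rfl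
    rw [hstep]
    have := ihq (k + 1) _ prev hinner.1 h1 (by intro i hi; exact hinner.2 i (by omega))
    refine ⟨this.1, this.2.1, ?_⟩
    intro i hi
    have hh := this.2.2 i hi
    rwa [show k + 1 + q = k + (q + 1) by omega] at hh

theorem pvRunA_correct (src tgt : List String) :
    pvRunA src tgt = pvLev src tgt src.length tgt.length := by
  have hdef : pvRunA src tgt =
      ((List.range' (0 + 1) tgt.length).foldl (pvStepOut src tgt src.length)
        ((List.range (src.length + 1)).map (fun (i : Nat) => (i : Int)),
         List.replicate (src.length + 1) (0 : Int))).1.getD src.length 0 := rfl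
  have h3 : ∀ i, i ≤ src.length → ((List.range (src.length + 1)).map (fun (i : Nat) => (i : Int))).getD i 0 = pvLev src tgt i 0 := by
    intro i hi
    have hlt : i < src.length + 1 := by omega
    simp [List.getD_eq_getElem?_getD, hlt, pvLev_zero_right]
  have h := pv_outer src tgt src.length tgt.length 0
    ((List.range (src.length + 1)).map (fun (i : Nat) => (i : Int)))
    (List.replicate (src.length + 1) (0 : Int)) (by simp) (by simp) h3
  rw [hdef]
  have hres := h.2.2 src.length le_rfl
  simpa using hres

-- ===== VERDICT (by name: the statement is the Claim_ definition above) =====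
theorem edit_distance_words_py_spec : Claim_equal_edit_distance_words_py := by
  intro s t _
  unfold Spec_edit_distance_words_py
  rw [pv_alt_eq_lev]
  show (if s.length = 0 then (t.length : Int) else if t.length = 0 then (s.length : Int) else if s.length > t.length then pvRunA t s else pvRunA s t) = pvLev s t s.length t.length
  split_ifs with h0 h1 h2
  · rw [h0]; simp [pvLev]
  · rw [h1, pvLev_zero_right]
  · rw [pvRunA_correct, pvLev_symm t s (s.length + t.length) t.length s.length (by omega)]
  · rw [pvRunA_correct]
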